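-- pv_equiv track=rewrite | github.com/nogarder77/NogarderLotto | src/utils/helpers.py | check_combination_overlap
-- ===== SOURCE A (Python) =====
-- from typing import List, Dict, Any, Optional, Union, Tuple
--
-- def check_combination_overlap(new_combination: List[int],
--                             existing_combinations: List[List[int]],
--                             min_overlap: int = 4) -> bool:
--     """
--     새 조합이 기존 조합들과 많이 겹치는지 확인
--
--     Args:
--         new_combination: 새 번호 조합
--         existing_combinations: 기존 번호 조합 목록
--         min_overlap: 겹침으로 간주할 최소 일치 개수
--
--     Returns:
--         많이 겹치면 True, 아니면 False
--     """
--     new_set = set(new_combination)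
--
--     for combo in existing_combinations:
--         existing_set = set(combo)
--         overlap_count = len(new_set.intersection(existing_set))
--
--         if overlap_count >= min_overlap:
--             return True
--
--     return False
-- ===== SOURCE B (Python) =====
-- def check_combination_overlap(new_combination, existing_combinations, min_overlap=4):
--     # Inverted index: number -> list of indices of existing combinations containing it.
--     index = {}
--     for i, combo in enumerate(existing_combinations):
--         for n in set(combo):
--             index.setdefault(n, []).append(i)
--     # Per-combination hit counters, driven by the new combination's distinct numbers.
--     counts = {}
--     for n in set(new_combination):
--         for i in index.get(n, []):
--             counts[i] = counts.get(i, 0) + 1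
--     return any(counts.get(i, 0) >= min_overlap for i in range(len(existing_combinations)))
-- ===== Notes on version B (the rewrite author's own statement) =====
-- stated objective: alternative
-- what changed: Replaces A's per-combination set-intersection scan by an inverted index from each number to the indices of existing combinations containing it, then drives per-combination hit counters from the new combination's distinct numbers and checks the counters against min_overlap.
import Mathlib
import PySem

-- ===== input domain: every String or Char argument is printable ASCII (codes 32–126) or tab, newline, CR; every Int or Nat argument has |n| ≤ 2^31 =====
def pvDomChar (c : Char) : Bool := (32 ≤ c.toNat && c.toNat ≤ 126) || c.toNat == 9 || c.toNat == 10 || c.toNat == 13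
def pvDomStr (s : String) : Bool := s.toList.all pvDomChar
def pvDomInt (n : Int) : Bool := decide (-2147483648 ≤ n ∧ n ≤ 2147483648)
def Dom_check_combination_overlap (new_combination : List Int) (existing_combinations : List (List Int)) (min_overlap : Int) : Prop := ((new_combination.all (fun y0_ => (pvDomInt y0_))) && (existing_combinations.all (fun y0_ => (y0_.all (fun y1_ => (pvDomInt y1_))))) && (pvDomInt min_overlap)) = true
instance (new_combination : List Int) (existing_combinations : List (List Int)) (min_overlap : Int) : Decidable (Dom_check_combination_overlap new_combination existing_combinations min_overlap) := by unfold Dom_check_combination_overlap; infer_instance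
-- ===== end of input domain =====

-- B replaces A's per-combination set-intersection scan by an inverted index (number -> indices of
-- combinations containing it) and per-combination hit counters; same results on all inputs (alternative).

-- ===== PORT A =====
-- the 'for combo in existing_combinations: … return True … / return False' loop
def pvLoopA (new_set : PySem.Set Int) (existing_combinations : List (List Int)) (min_overlap : Int) : Bool :=
  match existing_combinations with
  | [] => false
  | combo :: rest =>
    let existing_set : PySem.Set Int := PySem.Set.ofList combo
    let overlap_count : Int := (PySem.Set.inter new_set existing_set).length
    if min_overlap ≤ overlap_count then true else pvLoopA new_set rest min_overlap

def check_combination_overlap (new_combination : List Int) (existing_combinations : List (List Int)) (min_overlap : Int) : Bool :=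
  let new_set : PySem.Set Int := PySem.Set.ofList new_combination
  pvLoopA new_set existing_combinations min_overlap

-- ===== PORT B =====
-- index = {}; for i, combo in enumerate(existing_combinations): for n in set(combo): index.setdefault(n, []).append(i)
def pvIndexB (existing_combinations : List (List Int)) : PySem.Dict Int (List Int) :=
  (PySem.List.enumerate existing_combinations).foldl
    (fun d p => (PySem.Set.ofList p.2).foldl (fun d n => d.modify n [] (· ++ [p.1])) d)
    PySem.Dict.empty

-- counts = {}; for n in set(new_combination): for i in index.get(n, []): counts[i] = counts.get(i, 0) + 1
def pvCountsB (index : PySem.Dict Int (List Int)) (new_combination : List Int) : PySem.Dict Int Int :=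
  (PySem.Set.ofList new_combination).foldl
    (fun d n => (index.getD n []).foldl (fun d i => d.modify i 0 (· + 1)) d)
    PySem.Dict.empty

def check_combination_overlap_alt (new_combination : List Int) (existing_combinations : List (List Int)) (min_overlap : Int) : Bool :=
  let index := pvIndexB existing_combinations
  let counts := pvCountsB index new_combination
  -- any(counts.get(i, 0) >= min_overlap for i in range(len(existing_combinations)))
  (PySem.List.pyRange 0 existing_combinations.length 1).any
    (fun i => decide (min_overlap ≤ counts.getD i 0))

-- ===== PRECONDITION & SPEC =====
def Spec_check_combination_overlap (new_combination : List Int) (existing_combinations : List (List Int)) (min_overlap : Int) (out : Bool) : Prop := out = check_combination_overlap_alt new_combination existing_combinations min_overlap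
instance (new_combination : List Int) (existing_combinations : List (List Int)) (min_overlap : Int) (out : Bool) : Decidable (Spec_check_combination_overlap new_combination existing_combinations min_overlap out) := by unfold Spec_check_combination_overlap; infer_instance

-- ===== CLAIM (what is proved, stated in full; the proofs are below) =====
def Claim_equal_check_combination_overlap : Prop := ∀ (new_combination : List Int) (existing_combinations : List (List Int)) (min_overlap : Int), Dom_check_combination_overlap new_combination existing_combinations min_overlap → Spec_check_combination_overlap new_combination existing_combinations min_overlap (check_combination_overlap new_combination existing_combinations min_overlap)

-- ===== LEMMAS AND PROOFS =====

-- the overlap count A computes for one combination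
lemma pv_inter_len (s : PySem.Set Int) (c : List Int) :
    ((PySem.Set.inter s (PySem.Set.ofList c)).length : Int)
      = (s.countP (fun n => decide (n ∈ c)) : Int) := by
  unfold PySem.Set.inter
  rw [← List.countP_eq_length_filter]
  congr 1
  apply List.countP_congr
  intro n _
  simp [PySem.Set.contains_eq_listContains, PySem.Set.mem_ofList]

-- A's loop is an `any` over the combinations
lemma pv_loopA_eq_any (s : PySem.Set Int) (ecs : List (List Int)) (mo : Int) :
    pvLoopA s ecs mo = ecs.any (fun c => decide (mo ≤ (s.countP (fun n => decide (n ∈ c)) : Int))) := by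
  induction ecs with
  | nil => rfl
  | cons c rest ih =>
    simp only [pvLoopA, List.any_cons, ← ih, pv_inter_len]
    by_cases h : mo ≤ (s.countP (fun n => decide (n ∈ c)) : Int) <;> simp [h]

-- inner index-building loop over a duplicate-free list: the bucket of n gains [i] iff n occurs
lemma pv_inner_index (l : List Int) (hl : l.Nodup) (d : PySem.Dict Int (List Int)) (i n : Int) :
    ((l.foldl (fun d m => d.modify m [] (· ++ [i])) d).getD n [])
      = d.getD n [] ++ (if n ∈ l then [i] else []) := by
  induction l generalizing d with
  | nil => simp
  | cons m t ih =>
    simp only [List.foldl_cons]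
    rw [ih (by simpa using hl.of_cons)]
    rw [PySem.Dict.getD_modify]
    by_cases h : n = m
    · subst h
      have : n ∉ t := by simpa using (List.nodup_cons.mp hl).1
      simp [this]
    · simp [h, List.mem_cons]

-- the bucket of n lists, in order, the indices of the combinations containing n
lemma pv_index_gen (n : Int) (es : List (List Int)) (s : Int) (d : PySem.Dict Int (List Int)) :
    (((PySem.List.enumerate es s).foldl
        (fun d p => (PySem.Set.ofList p.2).foldl (fun d n => d.modify n [] (· ++ [p.1])) d) d).getD n [])
      = d.getD n [] ++ ((PySem.List.enumerate es s).filter (fun p => decide (n ∈ p.2))).map (·.1) := by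
  induction es generalizing s d with
  | nil => simp [PySem.List.enumerate_nil]
  | cons c t ih =>
    rw [PySem.List.enumerate_cons]
    simp only [List.foldl_cons, List.filter_cons]
    rw [ih]
    rw [pv_inner_index _ (PySem.Set.nodup_ofList c) d s n]
    by_cases h : n ∈ c
    · simp [h, PySem.Set.mem_ofList]
    · simp [h, PySem.Set.mem_ofList]

lemma pv_index_getD (ecs : List (List Int)) (n : Int) :
    (pvIndexB ecs).getD n []
      = ((PySem.List.enumerate ecs).filter (fun p => decide (n ∈ p.2))).map (·.1) := by
  unfold pvIndexB
  rw [pv_index_gen]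
  simp

-- the bucket of n contains a valid index k exactly once iff n is in the k-th combination
lemma pv_bucket_count (ecs : List (List Int)) (n : Int) (k : Nat) (hk : k < ecs.length) :
    (((PySem.List.enumerate ecs).filter (fun p => decide (n ∈ p.2))).map (·.1)).count (k : Int)
      = if n ∈ ecs[k] then 1 else 0 := by
  have hnd : (((PySem.List.enumerate ecs).filter (fun p => decide (n ∈ p.2))).map (·.1)).Nodup := by
    have h2 := (PySem.List.pairwise_lt_enumerate ecs 0).filter (fun p => decide (n ∈ p.2))
    have h3 : ((((PySem.List.enumerate ecs).filter (fun p => decide (n ∈ p.2))).map (·.1)).Pairwise (· < ·)) := by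
      rw [List.pairwise_map]; exact h2
    exact h3.imp (fun h => ne_of_lt h)
  have hmem : ((k : Int) ∈ (((PySem.List.enumerate ecs).filter (fun p => decide (n ∈ p.2))).map (·.1))) ↔ n ∈ ecs[k] := by
    simp only [List.mem_map, List.mem_filter, PySem.List.mem_enumerate_iff]
    constructor
    · rintro ⟨p, ⟨⟨k', hk', rfl⟩, hq⟩, hfst⟩
      simp only [zero_add] at hfst hq
      have : k' = k := by exact_mod_cast hfst
      subst this
      simpa using hq
    · intro h
      exact ⟨((k : Int), ecs[k]), ⟨⟨k, hk, by simp⟩, by simpa using h⟩, rfl⟩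
  by_cases h : n ∈ ecs[k]
  · rw [if_pos h]; exact List.count_eq_one_of_mem hnd (hmem.mpr h)
  · rw [if_neg h]; exact List.count_eq_zero_of_not_mem (fun hm => h (hmem.mp hm))

-- the counting loop, flattened
lemma pv_counts_getD (f : Int → List Int) (ns : List Int) (d : PySem.Dict Int Int) (i : Int) :
    ((ns.foldl (fun d n => (f n).foldl (fun d i => d.modify i 0 (· + 1)) d) d).getD i 0)
      = d.getD i 0 + ((ns.flatMap f).count i : Int) := by
  induction ns generalizing d with
  | nil => simp
  | cons n t ih =>
    simp only [List.foldl_cons, List.flatMap_cons, List.count_append]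
    rw [ih, PySem.Dict.getD_foldl_modify_add_one]
    push_cast
    ring

-- B's counter at a valid index is exactly A's overlap count there
lemma pv_counts_eq (nc : List Int) (ecs : List (List Int)) (k : Nat) (hk : k < ecs.length) :
    (pvCountsB (pvIndexB ecs) nc).getD (k : Int) 0
      = ((PySem.Set.ofList nc).countP (fun n => decide (n ∈ ecs[k])) : Int) := by
  unfold pvCountsB
  rw [pv_counts_getD]
  rw [PySem.Dict.getD_empty]
  rw [List.count_flatMap]
  have hmap : ((PySem.Set.ofList nc).map (List.count (k : Int) ∘ fun n => (pvIndexB ecs).getD n []))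
      = (PySem.Set.ofList nc).map (fun n => if decide (n ∈ ecs[k]) = true then 1 else 0) := by
    apply List.map_congr_left
    intro n _
    simp only [Function.comp]
    rw [pv_index_getD, pv_bucket_count ecs n k hk]
    simp
  rw [hmap, PySem.List.sum_map_ite_one_zero_nat]
  simp

-- `any` over a list agrees for pointwise-equal-on-members predicates
lemma pv_any_congr {l : List Nat} (f g : Nat → Bool) (h : ∀ k ∈ l, f k = g k) :
    l.any f = l.any g := by
  induction l with
  | nil => rfl
  | cons a t ih => simp_all [List.any_cons]

-- any over range(len l) of a predicate of l[k] is any over l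
lemma pv_any_range (l : List (List Int)) (p : List Int → Bool) :
    (List.range l.length).any (fun k => p (l.getD k [])) = l.any p := by
  rcases hb : l.any p with _ | _
  · rw [List.any_eq_false] at hb
    rw [List.any_eq_false]
    intro k hk
    rw [List.mem_range] at hk
    rw [List.getD_eq_getElem l [] hk]
    exact hb _ (List.getElem_mem hk)
  · rw [List.any_eq_true] at hb
    obtain ⟨c, hc, hpc⟩ := hb
    obtain ⟨k, hk, rfl⟩ := List.mem_iff_getElem.mp hc
    rw [List.any_eq_true]
    exact ⟨k, List.mem_range.mpr hk, by rwa [List.getD_eq_getElem l [] hk]⟩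

-- ===== VERDICT (by name: the statement is the Claim_ definition above) =====
theorem check_combination_overlap_spec : Claim_equal_check_combination_overlap := by
  intro nc ecs mo _
  show check_combination_overlap nc ecs mo = check_combination_overlap_alt nc ecs mo
  unfold check_combination_overlap check_combination_overlap_alt
  rw [pv_loopA_eq_any]
  rw [PySem.List.pyRange_one]
  simp only [sub_zero, Int.toNat_natCast, List.any_map]
  rw [← pv_any_range ecs (fun c => decide (mo ≤ ((PySem.Set.ofList nc).countP (fun n => decide (n ∈ c)) : Int)))]
  apply pv_any_congr
  intro k hk
  rw [List.mem_range] at hk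
  simp only [Function.comp, zero_add]
  rw [pv_counts_eq nc ecs k hk, List.getD_eq_getElem ecs [] hk]
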